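-- pv_equiv track=rewrite | github.com/JoseFausti/Prog_1 | Ejercicio_funciones__juego_del_ahorcado__.py | show_board
-- ===== SOURCE A (Python) =====
-- def show_board(word, guessed_letter):
--     board = ""
--     for letter in word:
--         if letter in guessed_letter:
--             board += letter
--         else:
--             board += "_"
--     return board
-- ===== SOURCE B (Python) =====
-- def show_board(word, guessed_letter):
--     pos = {}
--     for i, c in enumerate(word):
--         pos.setdefault(c, []).append(i)
--     board = ["_"] * len(word)
--     for g in set(guessed_letter):
--         for i in pos.get(g, ()):
--             board[i] = g
--     return "".join(board)
-- ===== Notes on version B (the rewrite author's own statement) =====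
-- stated objective: alternative
-- what changed: Instead of one pass over the word testing each letter's membership in the guess string and concatenating, B builds a positions index (dict char -> list of indices) in one pass, then for each distinct guessed letter reveals its recorded positions on a mutable '_' board and joins at the end.
import Mathlib
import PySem

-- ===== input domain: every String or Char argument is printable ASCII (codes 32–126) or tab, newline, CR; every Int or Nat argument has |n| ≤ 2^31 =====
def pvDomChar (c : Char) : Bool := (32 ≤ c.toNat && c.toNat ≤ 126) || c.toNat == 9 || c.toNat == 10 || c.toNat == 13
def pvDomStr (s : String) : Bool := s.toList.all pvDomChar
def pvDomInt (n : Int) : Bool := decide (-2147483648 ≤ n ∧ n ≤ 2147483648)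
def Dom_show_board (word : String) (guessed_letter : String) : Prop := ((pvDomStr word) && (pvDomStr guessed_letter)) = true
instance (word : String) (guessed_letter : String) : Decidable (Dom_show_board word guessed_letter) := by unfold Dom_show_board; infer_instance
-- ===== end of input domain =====

-- B replaces A's per-letter membership scan by a positions index built once (dict char -> indices) and reveals each distinct guess's positions on a mutable board; alternative decomposition (not measurably faster in a timing run).


-- ===== PORT A =====
-- 'letter in guessed_letter' for a single char is exactly membership of that char in the string's characters.
def show_board (word : String) (guessed_letter : String) : String :=
  String.mk (word.toList.foldl
    (fun board letter =>
      if guessed_letter.toList.contains letter then board ++ [letter] else board ++ ['_'])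
    [])

-- ===== PORT B =====
-- pos = {}; for i, c in enumerate(word): pos.setdefault(c, []).append(i)   -- in-place append = modify with (· ++ [i]), exact
-- board = ['_'] * len(word); for g in set(guessed_letter): for i in pos.get(g, ()): board[i] = g; ''.join(board)
-- enumerate indices are nonnegative, so .toNat on them is exact.
def show_board_alt (word : String) (guessed_letter : String) : String :=
  let pos : PySem.Dict Char (List Int) :=
    (PySem.List.enumerate word.toList 0).foldl
      (fun d p => d.modify p.2 [] (fun l => l ++ [p.1])) PySem.Dict.empty
  String.mk ((PySem.Set.ofList guessed_letter.toList).foldl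
    (fun b g => (pos.getD g []).foldl (fun b i => b.set i.toNat g) b)
    (List.replicate word.toList.length '_'))

-- ===== PRECONDITION & SPEC =====
def Spec_show_board (word : String) (guessed_letter : String) (out : String) : Prop := out = show_board_alt word guessed_letter
instance (word : String) (guessed_letter : String) (out : String) : Decidable (Spec_show_board word guessed_letter out) := by unfold Spec_show_board; infer_instance

-- ===== CLAIM (what is proved, stated in full; the proofs are below) =====
def Claim_equal_show_board : Prop := ∀ (word : String) (guessed_letter : String), Dom_show_board word guessed_letter → Spec_show_board word guessed_letter (show_board word guessed_letter)

-- ===== LEMMAS AND PROOFS =====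

/-- A's concatenation loop builds the pointwise map over the word. -/
lemma showA_foldl_eq_map (G : List Char) :
    ∀ (cs u : List Char),
      cs.foldl (fun board letter =>
          if G.contains letter then board ++ [letter] else board ++ ['_']) u
        = u ++ cs.map (fun c => if G.contains c then c else '_') := by
  intro cs
  induction cs with
  | nil => intro u; simp
  | cons c cs ih =>
    intro u
    simp only [List.foldl_cons, List.map_cons]
    rw [ih]
    cases hc : G.contains c <;> simp

/-- The grouping fold keyed by the pair's second component, re-expressed over swapped pairs. -/
lemma foldl_modify_swap (l : List (Int × Char)) (d : PySem.Dict Char (List Int)) :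
    l.foldl (fun d p => d.modify p.2 [] (fun t => t ++ [p.1])) d
      = (l.map Prod.swap).foldl (fun d q => d.modify q.1 [] (fun t => t ++ [q.2])) d := by
  induction l generalizing d with
  | nil => rfl
  | cons p l ih => simp [List.foldl_cons, ih]

/-- The positions index maps each character to the (ordered) indices where it occurs. -/
lemma pos_getD (word : List Char) (g : Char) :
    ((PySem.List.enumerate word 0).foldl
        (fun d p => d.modify p.2 [] (fun l => l ++ [p.1])) PySem.Dict.empty).getD g []
      = ((PySem.List.enumerate word 0).filter (fun p => p.2 == g)).map (·.1) := by
  rw [foldl_modify_swap]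
  rw [PySem.Dict.getD_foldl_modify_append]
  simp [List.filter_map, Function.comp_def, List.map_map, PySem.Dict.getD]

/-- Revealing g at its recorded positions (starting at offset u.length) maps the tail pointwise. -/
lemma inner_pass (g : Char) :
    ∀ (cs u : List Char) (f : Char → Char),
      ((((PySem.List.enumerate cs (u.length : Int)).filter (fun p => p.2 == g)).map (·.1)).foldl
          (fun b i => b.set i.toNat g)
          (u ++ cs.map f))
        = u ++ cs.map (fun c => if c == g then c else f c) := by
  intro cs
  induction cs with
  | nil => intro u f; simp [PySem.List.enumerate_nil]
  | cons c cs ih =>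
    intro u f
    rw [PySem.List.enumerate_cons]
    have key : ∀ c' : Char,
        ((((PySem.List.enumerate cs ((u.length : Int) + 1)).filter (fun p => p.2 == g)).map (·.1)).foldl
            (fun b i => b.set i.toNat g)
            ((u ++ [c']) ++ cs.map f))
          = (u ++ [c']) ++ cs.map (fun x => if x == g then x else f x) := by
      intro c'
      have := ih (u ++ [c']) f
      simpa [List.length_append] using this
    cases hc : c == g
    · have hc' : c ≠ g := by simpa using hc
      rw [List.filter_cons_of_neg (by simpa using hc)]
      rw [show u ++ (c :: cs).map f = (u ++ [f c]) ++ cs.map f by simp]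
      rw [key (f c)]
      simp only [List.map_cons]
      rw [if_neg (show ¬((c == g) = true) by simp [hc])]
      simp
    · have hc' : c = g := by simpa using hc
      rw [List.filter_cons_of_pos (by simpa using hc')]
      simp only [List.map_cons, List.foldl_cons]
      have hset : (u ++ f c :: cs.map f).set (Int.toNat (u.length : Int)) g
          = (u ++ [c]) ++ cs.map f := by
        rw [show Int.toNat (u.length : Int) = u.length from Int.toNat_natCast _]
        rw [List.set_append_right _ _ (le_refl u.length)]
        simp [hc']
      rw [hset, key c]
      simp [hc']

/-- B's loop over the distinct guesses turns the mapped board into the fully revealed board. -/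
lemma outer_pass (word : List Char) :
    ∀ (gs : List Char) (f : Char → Char),
      gs.foldl
          (fun b g =>
            ((((PySem.List.enumerate word 0).filter (fun p => p.2 == g)).map (·.1)).foldl
              (fun b i => b.set i.toNat g) b))
          (word.map f)
        = word.map (fun c => if gs.contains c then c else f c) := by
  intro gs
  induction gs with
  | nil => intro f; simp
  | cons g gs ih =>
    intro f
    have h0 := inner_pass g word [] f
    simp only [List.nil_append, List.length_nil, Nat.cast_zero] at h0
    simp only [List.foldl_cons, h0, ih]
    congr 1
    funext c
    by_cases h1 : c = g <;> by_cases h2 : c ∈ gs <;> simp [h1, h2]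

-- ===== VERDICT (by name: the statement is the Claim_ definition above) =====
theorem show_board_spec : Claim_equal_show_board := by
  intro word guessed_letter _
  unfold Spec_show_board show_board show_board_alt
  rw [showA_foldl_eq_map, List.nil_append, ← List.map_const']
  simp only [pos_getD]
  rw [outer_pass]
  congr 1
  refine List.map_congr_left (fun c _ => ?_)
  by_cases h : c ∈ guessed_letter.toList <;>
    simp [h, PySem.Set.mem_ofList]
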